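-- pv_equiv track=rewrite | github.com/alec-flowers/algorithmsUdacity | rearrange_array_elements.py | rearrange_digits
-- ===== SOURCE A (Python) =====
-- def rearrange_digits(input_list):
--     """
--     Rearrange Array Elements so as to form two number such that their sum is maximum.
--
--     Args:
--        input_list(list): Input List
--     Returns:
--        (int),(int): Two maximum sums
--     """
--     if len(input_list) <= 1:
--         return [-1,-1]
--
--     freq = [0 for _ in range(0,10)]
--     for i in input_list:
--         freq[i] += 1
--
--     num1 = ''
--     num2 = ''
--     idx = 9
--
--     while idx >= 0:
--         if freq[idx] == 0:
--             idx -= 1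
--             continue
--         if len(num1) > len(num2):
--             num2 += str(idx)
--         else:
--             num1 += str(idx)
--
--         freq[idx] -= 1
--
--     return [int(num1),int(num2)]
-- ===== SOURCE B (Python) =====
-- def rearrange_digits(input_list):
--     if len(input_list) <= 1:
--         return [-1, -1]
--     num1 = ''
--     num2 = ''
--     for i, d in enumerate(sorted(input_list, reverse=True)):
--         if i % 2 == 0:
--             num1 += str(d)
--         else:
--             num2 += str(d)
--     return [int(num1), int(num2)]
-- ===== Notes on version B (the rewrite author's own statement) =====
-- stated objective: alternative
-- what changed: Replaces A's frequency-array counting sort and 'append to the shorter string' while-loop by one descending comparison sort followed by a single striped pass (even positions extend num1, odd positions num2).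
-- outside the precondition, e.g. on rearrange_digits([5, -1]): A returns [9, 5], B returns [5, -1]; on rearrange_digits([-1, -2]): A returns [9, 8], B returns [-1, -2]
import Mathlib
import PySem

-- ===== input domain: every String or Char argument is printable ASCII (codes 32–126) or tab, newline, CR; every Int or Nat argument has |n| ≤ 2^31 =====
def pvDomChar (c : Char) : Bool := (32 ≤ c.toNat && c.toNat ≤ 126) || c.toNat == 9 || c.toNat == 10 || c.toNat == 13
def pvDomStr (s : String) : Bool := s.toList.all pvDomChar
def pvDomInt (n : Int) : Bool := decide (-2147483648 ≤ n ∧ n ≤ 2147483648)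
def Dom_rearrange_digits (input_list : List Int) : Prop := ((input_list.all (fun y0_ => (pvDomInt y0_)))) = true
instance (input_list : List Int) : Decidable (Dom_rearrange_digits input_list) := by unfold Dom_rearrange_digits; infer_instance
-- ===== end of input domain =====

-- B replaces A's counting array and shorter-string while-loop by one descending sort and a single
-- striped pass (even positions extend num1, odd positions num2); equivalence is proved on digit inputs.


-- ===== PORT A =====
-- termination helpers for the while-loop (measure only; no behaviour)
def pvSumNat (xs : List Int) : Nat := (xs.map Int.toNat).sum

theorem pvGetD_pos_lt (xs : List Int) (i : Int) (h0 : 0 ≤ i)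
    (h : PySem.List.pyGetD xs i 0 ≠ 0) : i.toNat < xs.length := by
  by_contra hlen
  have : PySem.List.pyGet? xs i = none := by
    rw [PySem.List.pyGet?_eq_none_iff]
    intro ⟨_, hlt⟩
    omega
  exact h (by simp [PySem.List.pyGetD, this])

theorem pvSumNat_set_lt (xs : List Int) (n : Nat) (hn : n < xs.length)
    (hpos : 0 < PySem.List.pyGetD xs (n : Int) 0) :
    pvSumNat (xs.set n (PySem.List.pyGetD xs (n : Int) 0 - 1)) < pvSumNat xs := by
  induction xs generalizing n with
  | nil => simp at hn
  | cons x xs ih =>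
    cases n with
    | zero =>
      simp [PySem.List.pyGetD] at hpos ⊢
      simp [pvSumNat]
      omega
    | succ m =>
      have hg : PySem.List.pyGetD (x :: xs) ((m + 1 : Nat) : Int) 0
          = PySem.List.pyGetD xs (m : Int) 0 := by
        simp [PySem.List.pyGetD, PySem.List.pyGet?_natCast]
      rw [hg] at hpos ⊢
      have := ih m (by simpa using hn) hpos
      simp [pvSumNat, List.set_cons_succ] at this ⊢
      omega

-- while idx >= 0: …  (the '0 < c' guard only makes the recursion total: Python's loop
-- does not terminate on a negative count, and counts built by A are never negative)
def pvLoopA (freq : List Int) (idx : Int) (num1 num2 : List Char) : List Char × List Char :=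
  if h0 : idx < 0 then (num1, num2)
  else
    if hc : PySem.List.pyGetD freq idx 0 = 0 then pvLoopA freq (idx - 1) num1 num2
    else if hpos : 0 < PySem.List.pyGetD freq idx 0 then
      if num1.length > num2.length then
        pvLoopA (PySem.List.pySetD freq idx (PySem.List.pyGetD freq idx 0 - 1)) idx num1 (num2 ++ PySem.Int.toChars idx)
      else
        pvLoopA (PySem.List.pySetD freq idx (PySem.List.pyGetD freq idx 0 - 1)) idx (num1 ++ PySem.Int.toChars idx) num2
    else (num1, num2)
termination_by (idx + 1).toNat + pvSumNat freq
decreasing_by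
  · omega
  · have hlt := pvGetD_pos_lt freq idx (by omega) (by omega)
    rw [PySem.List.pySetD_of_nonneg _ _ (by omega)]
    have := pvSumNat_set_lt freq idx.toNat hlt (by rw [Int.toNat_of_nonneg (by omega)]; omega)
    rw [Int.toNat_of_nonneg (by omega)] at this
    omega
  · have hlt := pvGetD_pos_lt freq idx (by omega) (by omega)
    rw [PySem.List.pySetD_of_nonneg _ _ (by omega)]
    have := pvSumNat_set_lt freq idx.toNat hlt (by rw [Int.toNat_of_nonneg (by omega)]; omega)
    rw [Int.toNat_of_nonneg (by omega)] at this
    omega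

def rearrange_digits (input_list : List Int) : List Int :=
  if input_list.length ≤ 1 then [-1, -1]
  else
    let freq := input_list.foldl
      (fun f i => PySem.List.pySetD f i (PySem.List.pyGetD f i 0 + 1))
      ((PySem.List.pyRange 0 10 1).map (fun _ => (0 : Int)))
    let p := pvLoopA freq 9 [] []
    [(PySem.Int.ofChars? p.1).getD 0, (PySem.Int.ofChars? p.2).getD 0]

-- ===== PORT B =====
def rearrange_digits_alt (input_list : List Int) : List Int :=
  if input_list.length ≤ 1 then [-1, -1]
  else
    let p := (PySem.List.enumerate (PySem.List.sorted input_list (fun x => x) true) 0).foldl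
      (fun (acc : List Char × List Char) (e : Int × Int) =>
        if PySem.Int.mod e.1 2 = 0 then (acc.1 ++ PySem.Int.toChars e.2, acc.2)
        else (acc.1, acc.2 ++ PySem.Int.toChars e.2)) ([], [])
    [(PySem.Int.ofChars? p.1).getD 0, (PySem.Int.ofChars? p.2).getD 0]

-- ===== PRECONDITION & SPEC =====
-- Pre_ restricts lists of length ≥ 2 to the function's natural domain, digits 0–9: outside it
-- A raises IndexError (values > 9 or < -10) or returns a value that is an accident of Python's
-- negative-index wraparound (values -10…-1 are counted as the digit 10+v).
def Pre_rearrange_digits (input_list : List Int) : Prop :=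
  input_list.length ≤ 1 ∨ ∀ x ∈ input_list, 0 ≤ x ∧ x ≤ 9
instance (input_list : List Int) : Decidable (Pre_rearrange_digits input_list) := by
  unfold Pre_rearrange_digits; infer_instance
def pvWitness_rearrange_digits : List Int := [4, 6, 2, 5, 9, 4, 0]

def Spec_rearrange_digits (input_list : List Int) (out : List Int) : Prop :=
  out = rearrange_digits_alt input_list
instance (input_list : List Int) (out : List Int) : Decidable (Spec_rearrange_digits input_list out) := by
  unfold Spec_rearrange_digits; infer_instance

-- ===== CLAIM (what is proved, stated in full; the proofs are below) =====
def Claim_equal_rearrange_digits : Prop := ∀ (input_list : List Int),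
  Dom_rearrange_digits input_list → Pre_rearrange_digits input_list →
  Spec_rearrange_digits input_list (rearrange_digits input_list)

-- ===== LEMMAS AND PROOFS =====

def pvEmit (freq : List Int) (idx : Int) : List Int :=
  if idx < 0 then []
  else
    if PySem.List.pyGetD freq idx 0 = 0 then pvEmit freq (idx - 1)
    else if 0 < PySem.List.pyGetD freq idx 0 then
      idx :: pvEmit (PySem.List.pySetD freq idx (PySem.List.pyGetD freq idx 0 - 1)) idx
    else []
termination_by (idx + 1).toNat + pvSumNat freq
decreasing_by
  · omega
  · have hlt := pvGetD_pos_lt freq idx (by omega) (by omega)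
    rw [PySem.List.pySetD_of_nonneg _ _ (by omega)]
    have := pvSumNat_set_lt freq idx.toNat hlt (by rw [Int.toNat_of_nonneg (by omega)]; omega)
    rw [Int.toNat_of_nonneg (by omega)] at this
    omega
def pvDistrib : List Int → List Char → List Char → List Char × List Char
  | [], n1, n2 => (n1, n2)
  | d :: ds, n1, n2 =>
    if n1.length > n2.length then pvDistrib ds n1 (n2 ++ PySem.Int.toChars d)
    else pvDistrib ds (n1 ++ PySem.Int.toChars d) n2

theorem pvLoopA_eq_distrib (freq : List Int) (idx : Int) (n1 n2 : List Char) :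
    pvLoopA freq idx n1 n2 = pvDistrib (pvEmit freq idx) n1 n2 := by
  fun_induction pvLoopA freq idx n1 n2 with
  | case1 freq idx n1 n2 h => rw [pvEmit]; simp [h, pvDistrib]
  | case2 freq idx n1 n2 h hc ih => rw [pvEmit]; simp only [if_neg h, if_pos hc]; exact ih
  | case3 freq idx n1 n2 h hc hpos hgt ih =>
    rw [pvEmit]; simp only [if_neg h, if_neg hc, if_pos hpos, pvDistrib, if_pos hgt]; exact ih
  | case4 freq idx n1 n2 h hc hpos hgt ih =>
    rw [pvEmit]; simp only [if_neg h, if_neg hc, if_pos hpos, pvDistrib, if_neg hgt]; exact ih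
  | case5 freq idx n1 n2 h hc hpos => rw [pvEmit]; simp [h, hc, hpos, pvDistrib]
def pvDescRep (freq : List Int) (idx : Int) : List Int :=
  if idx < 0 then []
  else List.replicate (PySem.List.pyGetD freq idx 0).toNat idx ++ pvDescRep freq (idx - 1)
termination_by (idx + 1).toNat

theorem pvDescRep_unfold (freq : List Int) (idx : Int) (h : ¬ idx < 0) :
    pvDescRep freq idx
      = List.replicate (PySem.List.pyGetD freq idx 0).toNat idx ++ pvDescRep freq (idx - 1) := by
  conv_lhs => rw [pvDescRep.eq_def]
  rw [if_neg h]

theorem pvDescRep_nil (freq : List Int) (idx : Int) (h : idx < 0) : pvDescRep freq idx = [] := by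
  rw [pvDescRep.eq_def, if_pos h]

theorem pvGetD_nonneg (xs : List Int) (i : Int) (h : ∀ v ∈ xs, 0 ≤ v) :
    0 ≤ PySem.List.pyGetD xs i 0 := by
  cases hg : PySem.List.pyGet? xs i with
  | none => simp [PySem.List.pyGetD, hg]
  | some v => simpa [PySem.List.pyGetD, hg] using h v (PySem.List.mem_of_pyGet?_eq_some xs hg)

theorem pvDescRep_congr (f1 f2 : List Int) (idx : Int)
    (h : ∀ j : Int, 0 ≤ j → j ≤ idx → PySem.List.pyGetD f1 j 0 = PySem.List.pyGetD f2 j 0) :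
    pvDescRep f1 idx = pvDescRep f2 idx := by
  fun_induction pvDescRep f1 idx with
  | case1 idx hlt => rw [pvDescRep_nil f2 _ hlt]
  | case2 idx hlt ih =>
    rw [pvDescRep_unfold f2 _ hlt, h idx (by omega) le_rfl,
      ih (fun j hj hj2 => h j hj (by omega))]

theorem pvGetD_set_ne (f : List Int) (n : Nat) (v : Int) (j : Int) (hj : 0 ≤ j) (hne : j.toNat ≠ n) :
    PySem.List.pyGetD (f.set n v) j 0 = PySem.List.pyGetD f j 0 := by
  simp [PySem.List.pyGetD, PySem.List.pyGet?_of_nonneg _ hj, List.getElem?_set_ne (Ne.symm hne)]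

theorem pvEmit_eq_descRep (freq : List Int) (idx : Int) (h : ∀ v ∈ freq, 0 ≤ v) :
    pvEmit freq idx = pvDescRep freq idx := by
  fun_induction pvEmit freq idx with
  | case1 freq idx hlt => rw [pvDescRep_nil freq _ hlt]
  | case2 freq idx hlt hc ih =>
    rw [pvDescRep_unfold freq _ hlt, hc, ih h]; simp
  | case3 freq idx hlt hc hpos ih =>
    have hrange := pvGetD_pos_lt freq idx (by omega) hc
    rw [PySem.List.pySetD_of_nonneg _ _ (by omega)] at ih ⊢
    have hset : ∀ v ∈ freq.set idx.toNat (PySem.List.pyGetD freq idx 0 - 1), 0 ≤ v := by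
      intro v hv
      rcases List.mem_or_eq_of_mem_set hv with hv | rfl
      · exact h v hv
      · omega
    have hgset : PySem.List.pyGetD (freq.set idx.toNat (PySem.List.pyGetD freq idx 0 - 1)) idx 0
        = PySem.List.pyGetD freq idx 0 - 1 := by
      simp [PySem.List.pyGetD, PySem.List.pyGet?_of_nonneg _ (show (0:Int) ≤ idx by omega),
        List.getElem?_set_self (by omega : idx.toNat < freq.length)]
    have htn : (PySem.List.pyGetD freq idx 0).toNat
        = (PySem.List.pyGetD freq idx 0 - 1).toNat + 1 := by omega
    rw [ih hset,
      pvDescRep_unfold (freq.set idx.toNat (PySem.List.pyGetD freq idx 0 - 1)) _ hlt, hgset,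
      pvDescRep_congr (freq.set idx.toNat (PySem.List.pyGetD freq idx 0 - 1)) freq (idx - 1)
        (fun j hj hj2 => pvGetD_set_ne freq idx.toNat _ j hj (by omega)),
      pvDescRep_unfold freq _ hlt, htn, List.replicate_succ]
    simp
  | case4 freq idx hlt hc hpos =>
    exact absurd (pvGetD_nonneg freq idx h) (by omega)
theorem pvDescRep_count (freq : List Int) (idx : Int) (a : Int) :
    (pvDescRep freq idx).count a =
      if 0 ≤ a ∧ a ≤ idx then (PySem.List.pyGetD freq a 0).toNat else 0 := by
  fun_induction pvDescRep freq idx with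
  | case1 idx hlt => simp; omega
  | case2 idx hlt ih =>
    rw [List.count_append, List.count_replicate, ih]
    by_cases hax : a = idx
    · subst hax
      simp; omega
    · simp [hax]
      split_ifs with h1 h2 h2 <;> omega

theorem pvDescRep_mem (freq : List Int) (idx : Int) (x : Int) (hx : x ∈ pvDescRep freq idx) :
    0 ≤ x ∧ x ≤ idx := by
  fun_induction pvDescRep freq idx with
  | case1 idx hlt => simp at hx
  | case2 idx hlt ih =>
    rcases List.mem_append.mp hx with hx | hx
    · have := List.eq_of_mem_replicate hx; omega
    · have := ih hx; omega

theorem pvDescRep_pairwise (freq : List Int) (idx : Int) :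
    (pvDescRep freq idx).Pairwise (fun a b => b ≤ a) := by
  fun_induction pvDescRep freq idx with
  | case1 idx hlt => exact List.Pairwise.nil
  | case2 idx hlt ih =>
    rw [List.pairwise_append]
    refine ⟨List.pairwise_replicate.mpr (Or.inr le_rfl), ih, ?_⟩
    intro x hx y hy
    have hxe := List.eq_of_mem_replicate hx
    have := pvDescRep_mem freq (idx - 1) y hy
    omega
theorem pvFoldl_nonneg (xs : List Int) (hxs : ∀ x ∈ xs, 0 ≤ x) (f : List Int) (hf : ∀ v ∈ f, 0 ≤ v) :
    ∀ v ∈ xs.foldl (fun f i => PySem.List.pySetD f i (PySem.List.pyGetD f i 0 + 1)) f, 0 ≤ v := by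
  induction xs generalizing f with
  | nil => exact hf
  | cons x xs ih =>
    rw [List.foldl_cons]
    apply ih (fun y hy => hxs y (List.mem_cons_of_mem _ hy))
    intro v hv
    rw [PySem.List.pySetD_of_nonneg _ _ (hxs x List.mem_cons_self)] at hv
    rcases List.mem_or_eq_of_mem_set hv with hv | rfl
    · exact hf v hv
    · have := pvGetD_nonneg f x hf; omega
  
theorem pvCount_foldl (xs : List Int) (f : List Int)
    (hxs : ∀ x ∈ xs, 0 ≤ x ∧ x ≤ 9) (hf : f.length = 10) (a : Int) (ha : 0 ≤ a) (ha9 : a ≤ 9) :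
    PySem.List.pyGetD
      (xs.foldl (fun f i => PySem.List.pySetD f i (PySem.List.pyGetD f i 0 + 1)) f) a 0
      = PySem.List.pyGetD f a 0 + xs.count a := by
  induction xs generalizing f with
  | nil => simp
  | cons x xs ih =>
    have hx := hxs x List.mem_cons_self
    rw [List.foldl_cons, ih _ (fun y hy => hxs y (List.mem_cons_of_mem _ hy))
      (by rw [PySem.List.length_pySetD]; exact hf)]
    rw [PySem.List.pySetD_of_nonneg _ _ hx.1]
    by_cases hax : a = x
    · subst hax
      have : PySem.List.pyGetD (f.set a.toNat (PySem.List.pyGetD f a 0 + 1)) a 0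
          = PySem.List.pyGetD f a 0 + 1 := by
        simp [PySem.List.pyGetD, PySem.List.pyGet?_of_nonneg _ ha,
          List.getElem?_set_self (by omega : a.toNat < f.length)]
      rw [this, List.count_cons_self]
      push_cast
      ring
    · rw [pvGetD_set_ne f x.toNat _ a ha (by omega)]
      simp [List.count_cons]
      omega
theorem pvSorted_eq_descRep (xs : List Int) (hxs : ∀ x ∈ xs, 0 ≤ x ∧ x ≤ 9) :
    PySem.List.sorted xs (fun x => x) true =
      pvDescRep (xs.foldl (fun f i => PySem.List.pySetD f i (PySem.List.pyGetD f i 0 + 1))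
        ((PySem.List.pyRange 0 10 1).map (fun _ => (0 : Int)))) 9 := by
  set F := xs.foldl (fun f i => PySem.List.pySetD f i (PySem.List.pyGetD f i 0 + 1))
      ((PySem.List.pyRange 0 10 1).map (fun _ => (0 : Int))) with hF
  have hinit : ((PySem.List.pyRange 0 10 1).map (fun _ => (0 : Int))) = List.replicate 10 0 := by
    decide
  have hget : ∀ a : Int, 0 ≤ a → a ≤ 9 → PySem.List.pyGetD F a 0 = xs.count a := by
    intro a ha ha9
    rw [hF, pvCount_foldl xs _ hxs (by decide) a ha ha9]
    have : PySem.List.pyGetD ((PySem.List.pyRange 0 10 1).map (fun _ => (0 : Int))) a 0 = 0 := by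
      cases hg : PySem.List.pyGet? ((PySem.List.pyRange 0 10 1).map (fun _ => (0 : Int))) a with
      | none => unfold PySem.List.pyGetD; rw [hg]; rfl
      | some v =>
        have hm := PySem.List.mem_of_pyGet?_eq_some _ hg
        simp at hm
        unfold PySem.List.pyGetD
        rw [hg]
        simpa using hm
    rw [this, zero_add]
  have hperm : (pvDescRep F 9).Perm xs := by
    rw [List.perm_iff_count]
    intro a
    rw [pvDescRep_count]
    by_cases ha : 0 ≤ a ∧ a ≤ 9
    · rw [if_pos ha, hget a ha.1 ha.2]
      omega
    · rw [if_neg ha]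
      have : a ∉ xs := fun hmem => ha ⟨(hxs a hmem).1, (hxs a hmem).2⟩
      simp [List.count_eq_zero_of_not_mem this]
  apply PySem.List.eq_of_perm_of_pairwise_le_of_injective (fun x : Int => -x)
    (fun a b h => by simpa using h)
  · exact (PySem.List.sorted_perm xs _ true).trans hperm.symm
  · exact (PySem.List.sorted_pairwise_rev xs (fun x => x)).imp (by intro a b h; simp; omega)
  · exact (pvDescRep_pairwise F 9).imp (by intro a b h; simp; omega)
def pvStripe : Bool → List Int → List Int
  | _, [] => []
  | true, d :: ds => d :: pvStripe false ds
  | false, _ :: ds => pvStripe true ds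

def pvFlat (ds : List Int) : List Char := ds.flatMap PySem.Int.toChars

theorem pvToChars_len (d : Int) (h1 : 0 ≤ d) (h2 : d ≤ 9) : (PySem.Int.toChars d).length = 1 := by
  interval_cases d <;> decide

theorem pvDistrib_stripe (ds : List Int) (hds : ∀ d ∈ ds, 0 ≤ d ∧ d ≤ 9) :
    ∀ n1 n2 : List Char,
      (n1.length = n2.length →
        pvDistrib ds n1 n2 = (n1 ++ pvFlat (pvStripe true ds), n2 ++ pvFlat (pvStripe false ds))) ∧
      (n1.length = n2.length + 1 →
        pvDistrib ds n1 n2 = (n1 ++ pvFlat (pvStripe false ds), n2 ++ pvFlat (pvStripe true ds))) := by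
  induction ds with
  | nil => intro n1 n2; simp [pvDistrib, pvStripe, pvFlat]
  | cons d ds ih =>
    intro n1 n2
    have hd := hds d List.mem_cons_self
    have hlen := pvToChars_len d hd.1 hd.2
    have ih' := ih (fun x hx => hds x (List.mem_cons_of_mem _ hx))
    constructor
    · intro heq
      rw [pvDistrib, if_neg (by omega)]
      have := (ih' (n1 ++ PySem.Int.toChars d) n2).2 (by simp [hlen, heq])
      rw [this]
      simp [pvStripe, pvFlat]
    · intro heq
      rw [pvDistrib, if_pos (by omega)]
      have := (ih' n1 (n2 ++ PySem.Int.toChars d)).1 (by simp [hlen, heq])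
      rw [this]
      simp [pvStripe, pvFlat]

theorem pvFold_enum_stripe (s : List Int) : ∀ (k : Int), 0 ≤ k → ∀ a b : List Char,
    (PySem.Int.mod k 2 = 0 →
      (PySem.List.enumerate s k).foldl
        (fun (acc : List Char × List Char) (e : Int × Int) =>
          if PySem.Int.mod e.1 2 = 0 then (acc.1 ++ PySem.Int.toChars e.2, acc.2)
          else (acc.1, acc.2 ++ PySem.Int.toChars e.2)) (a, b)
        = (a ++ pvFlat (pvStripe true s), b ++ pvFlat (pvStripe false s))) ∧
    (PySem.Int.mod k 2 = 1 →
      (PySem.List.enumerate s k).foldl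
        (fun (acc : List Char × List Char) (e : Int × Int) =>
          if PySem.Int.mod e.1 2 = 0 then (acc.1 ++ PySem.Int.toChars e.2, acc.2)
          else (acc.1, acc.2 ++ PySem.Int.toChars e.2)) (a, b)
        = (a ++ pvFlat (pvStripe false s), b ++ pvFlat (pvStripe true s))) := by
  induction s with
  | nil => intro k hk a b; simp [PySem.List.enumerate, pvStripe, pvFlat]
  | cons d s ih =>
    intro k hk a b
    have hmod : PySem.Int.mod k 2 = k % 2 := PySem.Int.mod_of_nonneg k (by omega)
    have hmod1 : PySem.Int.mod (k + 1) 2 = (k + 1) % 2 := PySem.Int.mod_of_nonneg _ (by omega)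
    constructor
    · intro h0
      simp only [PySem.List.enumerate, List.foldl_cons, if_pos h0]
      have := (ih (k + 1) (by omega) (a ++ PySem.Int.toChars d) b).2 (by rw [hmod1]; rw [hmod] at h0; omega)
      rw [this]
      simp [pvStripe, pvFlat]
    · intro h1
      simp only [PySem.List.enumerate, List.foldl_cons, if_neg (by omega : ¬ PySem.Int.mod k 2 = 0)]
      have := (ih (k + 1) (by omega) a (b ++ PySem.Int.toChars d)).1 (by rw [hmod1]; rw [hmod] at h1; omega)
      rw [this]
      simp [pvStripe, pvFlat]

-- ===== VERDICT (by name: the statement is the Claim_ definition above) =====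
theorem rearrange_digits_spec : Claim_equal_rearrange_digits := by
  intro l _ hpre
  unfold Spec_rearrange_digits rearrange_digits rearrange_digits_alt
  by_cases hlen : l.length ≤ 1
  · simp [hlen]
  · simp only [hlen, if_false]
    have hdig : ∀ x ∈ l, 0 ≤ x ∧ x ≤ 9 := by
      rcases hpre with h | h
      · omega
      · exact h
    have hnn : ∀ v ∈ l.foldl (fun f i => PySem.List.pySetD f i (PySem.List.pyGetD f i 0 + 1))
        ((PySem.List.pyRange 0 10 1).map (fun _ => (0 : Int))), 0 ≤ v := by
      apply pvFoldl_nonneg l (fun x hx => (hdig x hx).1)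
      intro v hv
      simp at hv
      omega
    have hemit : pvEmit (l.foldl (fun f i => PySem.List.pySetD f i (PySem.List.pyGetD f i 0 + 1))
        ((PySem.List.pyRange 0 10 1).map (fun _ => (0 : Int)))) 9
        = PySem.List.sorted l (fun x => x) true := by
      rw [pvEmit_eq_descRep _ _ hnn, ← pvSorted_eq_descRep l hdig]
    have hsd : ∀ d ∈ PySem.List.sorted l (fun x => x) true, 0 ≤ d ∧ d ≤ 9 := by
      intro d hd
      exact hdig d ((PySem.List.mem_sorted l _ true d).mp hd)
    have h1 := (pvDistrib_stripe _ hsd [] []).1 rfl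
    have h2 := (pvFold_enum_stripe (PySem.List.sorted l (fun x => x) true) 0 le_rfl [] []).1 (by decide)
    rw [pvLoopA_eq_distrib, hemit, h1]
    simp only [List.nil_append] at h2 ⊢
    rw [h2]
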